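-- pv_equiv track=rewrite | github.com/danielrosehill/Iran-Israel-War-2026-OSINT | scripts/backfill_categories.py | any_true
-- ===== SOURCE A (Python) =====
-- def any_true(types: dict, keys: list) -> bool | None:
--     """Return True if any key is True, False if none are True, None if all are None/missing."""
--     found_false = False
--     for k in keys:
--         v = types.get(k)
--         if v is True:
--             return True
--         if v is False:
--             found_false = True
--     return False if found_false else None
-- ===== SOURCE B (Python) =====
-- def any_true(types: dict, keys: list) -> bool | None:
--     """Return True if any key is True, False if none are True, None if all are None/missing."""
--     vals = [types.get(k) for k in keys]
--     if any(v is True for v in vals):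
--         return True
--     if any(v is False for v in vals):
--         return False
--     return None
-- ===== Notes on version B (the rewrite author's own statement) =====
-- stated objective: simpler
-- what changed: B first materialises the looked-up values into a list, then answers with two separate any-scans (any True, else any False), replacing A's single pass with a mutable found_false flag and early return.
import Mathlib
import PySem

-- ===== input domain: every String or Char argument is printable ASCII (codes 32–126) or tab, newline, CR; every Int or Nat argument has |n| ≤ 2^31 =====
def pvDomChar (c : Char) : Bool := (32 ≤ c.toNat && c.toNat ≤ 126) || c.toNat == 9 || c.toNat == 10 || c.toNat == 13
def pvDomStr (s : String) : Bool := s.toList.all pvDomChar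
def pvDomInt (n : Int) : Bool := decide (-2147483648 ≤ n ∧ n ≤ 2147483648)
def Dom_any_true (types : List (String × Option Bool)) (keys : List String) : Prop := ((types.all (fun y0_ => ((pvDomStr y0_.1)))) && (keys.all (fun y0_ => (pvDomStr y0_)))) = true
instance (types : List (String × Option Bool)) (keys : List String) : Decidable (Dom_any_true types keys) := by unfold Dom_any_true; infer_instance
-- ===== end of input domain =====

-- B replaces A's single early-exit loop with a found_false flag by a collect-then-two-scans decomposition; same O(n) cost.

-- ===== PORT A =====
-- the loop over keys with the found_false flag
def any_true_loop (types : List (String × Option Bool)) (keys : List String) (found_false : Bool) : Option Bool :=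
  match keys with
  | [] => if found_false then some false else none
  | k :: rest =>
    let v : Option Bool := (PySem.Dict.mk types).getD k none   -- types.get(k)
    if v = some true then some true
    else any_true_loop types rest (if v = some false then true else found_false)

def any_true (types : List (String × Option Bool)) (keys : List String) : Option Bool :=
  any_true_loop types keys false

-- ===== PORT B =====
def any_true_alt (types : List (String × Option Bool)) (keys : List String) : Option Bool :=
  let vals := keys.map (fun k => (PySem.Dict.mk types).getD k none)
  if vals.any (fun v => v = some true) then some true
  else if vals.any (fun v => v = some false) then some false
  else none

-- ===== PRECONDITION & SPEC =====
def Spec_any_true (types : List (String × Option Bool)) (keys : List String) (out : Option Bool) : Prop := out = any_true_alt types keys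
instance (types : List (String × Option Bool)) (keys : List String) (out : Option Bool) : Decidable (Spec_any_true types keys out) := by unfold Spec_any_true; infer_instance

-- ===== CLAIM (what is proved, stated in full; the proofs are below) =====
def Claim_equal_any_true : Prop := ∀ (types : List (String × Option Bool)) (keys : List String), Dom_any_true types keys → Spec_any_true types keys (any_true types keys)

-- ===== LEMMAS AND PROOFS =====
theorem any_true_loop_eq (types : List (String × Option Bool)) (keys : List String) (ff : Bool) :
    any_true_loop types keys ff =
      (let vals := keys.map (fun k => (PySem.Dict.mk types).getD k none)
       if vals.any (fun v => v = some true) then some true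
       else if ff || vals.any (fun v => v = some false) then some false
       else none) := by
  induction keys generalizing ff with
  | nil => cases ff <;> simp [any_true_loop]
  | cons k rest ih =>
    simp only [any_true_loop, List.map_cons, List.any_cons, ih]
    by_cases h1 : (PySem.Dict.mk types).getD k none = some true <;>
      by_cases h2 : (PySem.Dict.mk types).getD k none = some false <;>
      cases ff <;> simp [h1, h2]

-- ===== VERDICT (by name: the statement is the Claim_ definition above) =====
theorem any_true_spec : Claim_equal_any_true := by
  intro types keys _
  show any_true types keys = any_true_alt types keys
  simp [any_true, any_true_alt, any_true_loop_eq]
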